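-- pv_equiv track=rewrite | github.com/Angelooc/first_commit | 7_kyu_Números_em_string.py | solve
-- ===== SOURCE A (Python) =====
-- def solve(s):
--     max_num =0
--     current_num = ""
--
--     for character in s:
--         if character.isdigit():
--
--                         current_num += character
--         else:
--             if current_num:
--                 max_num = max(max_num, int(current_num))
--                 current_num = ""
--
--     if current_num:
--         max_num = max(max_num, int(current_num))
--
--     return max_num
-- ===== SOURCE B (Python) =====
-- def solve(s):
--     # two-phase: collect every maximal digit run as an int, then reduce with max
--     runs = []
--     n = len(s)
--     i = 0
--     while i < n:
--         if s[i].isdigit():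
--             j = i
--             while j < n and s[j].isdigit():
--                 j += 1
--             runs.append(int(s[i:j]))
--             i = j
--         else:
--             i += 1
--     return max(runs, default=0)
-- ===== Notes on version B (the rewrite author's own statement) =====
-- stated objective: alternative
-- what changed: A keeps a running max and a growing accumulator string in one char-by-char loop; B first scans the string with an index, slicing out each maximal digit run into a list of ints, and then reduces that list with max(runs, default=0) in a separate pass.
import Mathlib
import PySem

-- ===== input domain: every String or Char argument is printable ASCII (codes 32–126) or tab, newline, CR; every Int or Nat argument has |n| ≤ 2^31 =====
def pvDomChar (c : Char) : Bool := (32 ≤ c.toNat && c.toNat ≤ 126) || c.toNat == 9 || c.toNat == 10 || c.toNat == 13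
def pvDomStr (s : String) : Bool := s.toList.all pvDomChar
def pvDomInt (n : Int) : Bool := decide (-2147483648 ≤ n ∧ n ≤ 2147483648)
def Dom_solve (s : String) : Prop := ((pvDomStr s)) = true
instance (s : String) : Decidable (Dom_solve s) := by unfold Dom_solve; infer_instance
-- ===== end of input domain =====

-- B replaces A's single char loop (running max + growing accumulator string) by a two-phase scan:
-- collect each maximal digit run as an int, then reduce the list with max(runs, default=0). Objective: alternative, same cost.

-- int(cs) with a default; both programs only apply int() to nonempty all-digit runs, where it returns
def pvVal (cs : List Char) : Int := (PySem.Int.ofChars? cs).getD 0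

-- ===== PORT A =====
-- the for-loop of A with its two pieces of state (max_num, current_num)
def solveLoop : List Char → Int → List Char → Int
  | [], m, cur => if cur.isEmpty then m else max m (pvVal cur)
  | c :: rest, m, cur =>
    if PySem.Chars.isdigit c then solveLoop rest m (cur ++ [c])
    else if cur.isEmpty then solveLoop rest m cur
    else solveLoop rest (max m (pvVal cur)) []

def solve (s : String) : Int := solveLoop s.toList 0 []

-- ===== PORT B =====
-- the outer while-loop of Source B: at a digit, take the whole run (the inner while) and skip past it
def pvRuns : List Char → List Int
  | [] => []
  | c :: cs =>
    if PySem.Chars.isdigit c then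
      pvVal ((c :: cs).takeWhile PySem.Chars.isdigit)
        :: pvRuns ((c :: cs).dropWhile PySem.Chars.isdigit)
    else pvRuns cs
  termination_by cs => cs.length
  decreasing_by
    · simp only [List.dropWhile_cons_of_pos ‹_›]
      exact Nat.lt_succ_of_le (List.length_dropWhile_le _ _)
    · simp

def solve_alt (s : String) : Int := PySem.List.maxD (pvRuns s.toList) (fun x => x) 0

-- ===== PRECONDITION & SPEC =====
def Spec_solve (s : String) (out : Int) : Prop := out = solve_alt s
instance (s : String) (out : Int) : Decidable (Spec_solve s out) := by unfold Spec_solve; infer_instance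

-- ===== CLAIM (what is proved, stated in full; the proofs are below) =====
def Claim_equal_solve : Prop := ∀ (s : String), Dom_solve s → Spec_solve s (solve s)

-- ===== LEMMAS AND PROOFS =====

lemma isIntSpace_false_of_digit (c : Char) (h : PySem.Chars.isdigit c = true) :
    PySem.Int.isIntSpace c = false := by
  simp [PySem.Chars.isdigit, Char.le_def, UInt32.le_iff_toNat_le] at h
  simp [PySem.Int.isIntSpace, Char.ext_iff, UInt32.toNat_inj.symm]
  omega

lemma pvVal_nonneg (cs : List Char) (h : ∀ c ∈ cs, PySem.Chars.isdigit c = true) :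
    0 ≤ pvVal cs := by
  have gen : ∀ (X : Option Nat),
      0 ≤ (Option.map (fun n : Int => n) (X.bind (fun a => pure ((a : Int))))).getD 0 := by
    intro X; cases X <;> simp
  have hstrip : ∀ ds : List Char, (∀ c ∈ ds, PySem.Chars.isdigit c = true) →
      List.dropWhile PySem.Int.isIntSpace ds = ds := by
    intro ds hds
    cases ds with
    | nil => rfl
    | cons d t =>
      rw [List.dropWhile_cons_of_neg]
      simp [isIntSpace_false_of_digit d (hds d (by simp))]
  unfold pvVal PySem.Int.ofChars?
  rw [hstrip _ h, hstrip _ (by intro c hc; exact h c (by simpa using hc)), List.reverse_reverse]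
  dsimp only
  split
  · exact absurd (h '-' (by simp)) (by decide)
  · exact absurd (h '+' (by simp)) (by decide)
  · exact gen _

lemma pvRuns_nonneg (cs : List Char) : ∀ x ∈ pvRuns cs, 0 ≤ x := by
  induction cs using pvRuns.induct with
  | case1 => simp [pvRuns]
  | case2 c cs hd ih =>
    intro x hx
    simp only [pvRuns, if_pos hd, List.mem_cons] at hx
    rcases hx with hx | hx
    · subst hx
      exact pvVal_nonneg _ (fun c hc => List.mem_takeWhile_imp hc)
    · exact ih x hx
  | case3 c cs hd ih =>
    intro x hx
    simp only [pvRuns, if_neg hd] at hx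
    exact ih x hx

-- B's run list when a nonempty all-digit prefix is followed by a non-digit
lemma pvRuns_digits_append (cur : List Char) (hne : cur ≠ [])
    (hd : ∀ c ∈ cur, PySem.Chars.isdigit c = true)
    (c : Char) (hc : ¬ PySem.Chars.isdigit c = true) (rest : List Char) :
    pvRuns (cur ++ c :: rest) = pvVal cur :: pvRuns rest := by
  cases cur with
  | nil => exact absurd rfl hne
  | cons d ds =>
    have hdd : PySem.Chars.isdigit d = true := hd d (by simp)
    have htake : (d :: ds ++ c :: rest).takeWhile PySem.Chars.isdigit = d :: ds := by
      rw [List.takeWhile_append_of_pos (by simpa using hd)]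
      simp [List.takeWhile_cons_of_neg hc]
    have hdrop : (d :: ds ++ c :: rest).dropWhile PySem.Chars.isdigit = c :: rest := by
      rw [List.dropWhile_append_of_pos (by simpa using hd)]
      simp [List.dropWhile_cons_of_neg hc]
    rw [List.cons_append, pvRuns, if_pos hdd, ← List.cons_append, htake, hdrop,
      pvRuns, if_neg hc]

-- the run list of a nonempty all-digit string is the single run
lemma pvRuns_all_digits (cur : List Char) (hne : cur ≠ [])
    (hd : ∀ c ∈ cur, PySem.Chars.isdigit c = true) :
    pvRuns cur = [pvVal cur] := by
  cases cur with
  | nil => exact absurd rfl hne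
  | cons d ds =>
    have hdd : PySem.Chars.isdigit d = true := hd d (by simp)
    rw [pvRuns, if_pos hdd, List.takeWhile_eq_self_iff.mpr (by simpa using hd),
      List.dropWhile_eq_nil_iff.mpr (fun x hx => hd x hx), pvRuns]

-- loop invariant: A's loop over cs with accumulator cur computes the fold of max over B's runs of cur ++ cs
lemma solveLoop_eq_foldl (cs : List Char) : ∀ (m : Int) (cur : List Char),
    (∀ c ∈ cur, PySem.Chars.isdigit c = true) →
    solveLoop cs m cur = (pvRuns (cur ++ cs)).foldl max m := by
  induction cs with
  | nil =>
    intro m cur hd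
    by_cases hne : cur = []
    · subst hne; simp [solveLoop, pvRuns]
    · simp [solveLoop, List.isEmpty_iff, hne, pvRuns_all_digits cur hne hd]
  | cons c rest ih =>
    intro m cur hd
    by_cases hdc : PySem.Chars.isdigit c = true
    · rw [solveLoop, if_pos hdc, ih m (cur ++ [c])
        (by intro x hx; rcases List.mem_append.mp hx with h | h;
            · exact hd x h
            · simpa [List.mem_singleton.mp h] using hdc),
        List.append_assoc]
      rfl
    · by_cases hne : cur = []
      · subst hne
        rw [solveLoop, if_neg hdc, if_pos (show (List.isEmpty ([] : List Char)) = true from rfl), ih m [] (by simp)]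
        simp [pvRuns, hdc]
      · rw [solveLoop, if_neg hdc, if_neg (by simpa [List.isEmpty_iff] using hne),
          ih _ [] (by simp), pvRuns_digits_append cur hne hd c hdc rest]
        simp

-- fold of max from 0 equals max(runs, default=0) when every run is nonneg
lemma foldl_max_eq_maxD (xs : List Int) (hnn : ∀ x ∈ xs, 0 ≤ x) :
    xs.foldl max 0 = PySem.List.maxD xs (fun x => x) 0 := by
  cases xs with
  | nil => rfl
  | cons x t =>
    rw [PySem.List.maxD, PySem.List.max?_id_cons, Option.getD_some, List.foldl_cons,
      max_eq_right (hnn x (by simp))]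

-- ===== VERDICT (by name: the statement is the Claim_ definition above) =====
theorem solve_spec : Claim_equal_solve := by
  intro s _
  unfold Spec_solve solve solve_alt
  rw [solveLoop_eq_foldl s.toList 0 [] (by simp), List.nil_append,
    foldl_max_eq_maxD _ (pvRuns_nonneg s.toList)]
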